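-- pv_equiv track=rewrite | github.com/natasha-mcmillan/my-google-foobar-solutions | level-2.1.py | lambsDelivered
-- ===== SOURCE A (Python) =====
-- def lambsDelivered(total_lambs):
-- 	#given any integer total_lambs divide them in the most generous and stingy ways possible
--
-- 	def generous(total_lambs):
-- 		#do the generous calculation here
-- 		#The generous calculation starts from 1 and doubles each time
-- 		#I need to keep a sum of all the payments (doubled numbers)
-- 		doubleStart = [1,1] #[startingValue,sumOfAllValues]
-- 		paidHenchmen = 1 #We've only paid 1 henchman 1 lamb so far
--
-- 		while doubleStart[1] < total_lambs:
-- 			newDouble = doubleStart[0]*2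
-- 			doubleStart[0] = newDouble
-- 			doubleStart[1] = doubleStart[1] + newDouble
--
-- 			if doubleStart[1] <= total_lambs:
-- 				paidHenchmen = paidHenchmen + 1
--
-- 		return paidHenchmen
--
--
-- 	def stingy(total_lambs):
-- 		#I have noticed that the stingy payout rules can be satisfied through following the
-- 		#fibonacci sequence.
--
-- 		#Calculate fibonacci through keeping most recent 2 numbers
-- 		#Also keep the total sum of fibonacci numbers - which must stay below (or equal to) total_lambs
--
-- 		#This is an edge case that would be improperly handled starting from fibStart = [1,1,2]
-- 		if total_lambs == 1:
-- 			return 1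
--
-- 		fibStart = [1,1,2] #[fibX,fibX+1,fibSum]
--
-- 		paidHenchmen = 2 #since the first 2 have already been accounted for.
--
-- 		while fibStart[2] < total_lambs:
-- 			nextFib = fibStart[0] + fibStart[1]
-- 			fibStart[0] = fibStart[1]
-- 			fibStart[1] = nextFib
--
-- 			fibStart[2] = fibStart[2] + fibStart[1]
--
-- 			if fibStart[2] <= total_lambs:
-- 				paidHenchmen = paidHenchmen + 1
--
-- 		return paidHenchmen
--
--
-- 	#Handling the case of Zero Lambs outside of the generous and stingy functions
-- 	if total_lambs == 0:
-- 	    return 0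
-- 	else:
-- 	    return stingy(total_lambs) - generous(total_lambs)
-- ===== SOURCE B (Python) =====
-- def lambsDelivered(total_lambs):
--     # Generous count in closed form (largest n with 2^n - 1 <= total_lambs);
--     # stingy count as one loop over Fibonacci partial sums.
--     # For total_lambs <= 0 no henchman can be paid at all.
--     if total_lambs <= 0:
--         return 0
--     generous = (total_lambs + 1).bit_length() - 1
--     stingy = 0
--     a, b, s = 1, 1, 1
--     while s <= total_lambs:
--         stingy += 1
--         a, b = b, a + b
--         s += a
--     return stingy - generous
-- ===== Notes on version B (the rewrite author's own statement) =====
-- stated objective: simpler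
-- what changed: The generous doubling loop is replaced by the closed form bit_length(total_lambs+1)-1, and the stingy count becomes a single uniform loop counting Fibonacci partial sums, removing A's special-cased small input and the mutable triple states.
-- intended difference: On negative total_lambs A returns 1 (its loops never run, leaving the pre-initialised counts stingy=2, generous=1), while B returns 0, the intended value since no henchman can be paid with a negative number of lambs. — e.g. on lambsDelivered(-1): A returns 1, B returns 0
import Mathlib
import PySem

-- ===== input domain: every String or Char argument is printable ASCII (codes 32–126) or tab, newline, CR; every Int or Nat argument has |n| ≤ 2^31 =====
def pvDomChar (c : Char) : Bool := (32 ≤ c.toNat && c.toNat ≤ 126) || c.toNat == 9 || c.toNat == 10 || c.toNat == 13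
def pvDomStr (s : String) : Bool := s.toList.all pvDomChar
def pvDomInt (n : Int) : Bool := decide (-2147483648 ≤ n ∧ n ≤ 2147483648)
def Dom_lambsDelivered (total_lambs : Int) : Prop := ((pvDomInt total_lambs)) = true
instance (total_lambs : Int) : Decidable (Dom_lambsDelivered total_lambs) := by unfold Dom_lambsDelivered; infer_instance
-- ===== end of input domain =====

-- B replaces A's generous doubling loop by the bit_length closed form and A's two-phase
-- stingy computation (special case for total_lambs==1 plus a three-slot mutable loop) by
-- one uniform Fibonacci-partial-sum counting loop; objective: simpler. A and B differ
-- only on negative total_lambs (see D_ below).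

-- ===== PORT A =====

-- A's generous while-loop: state [doubleStart0, doubleStart1] = (d, sum), paidHenchmen.
-- (The 1 ≤ d argument only justifies termination; it carries no extra computation.)
def genLoopA (t d sum paid : Int) (hd : 1 ≤ d) : Int :=
  if sum < t then
    genLoopA t (d * 2) (sum + d * 2) (if sum + d * 2 ≤ t then paid + 1 else paid)
      (by omega)
  else paid
termination_by (t - sum).toNat
decreasing_by omega

-- A's stingy while-loop: state [fibX, fibX+1, fibSum] = (f0, f1, sum), paidHenchmen.
def stingyLoopA (t f0 f1 sum paid : Int) (h0 : 1 ≤ f0) (h1 : 1 ≤ f1) : Int :=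
  if sum < t then
    stingyLoopA t f1 (f0 + f1) (sum + (f0 + f1))
      (if sum + (f0 + f1) ≤ t then paid + 1 else paid) h1 (by omega)
  else paid
termination_by (t - sum).toNat
decreasing_by omega

def lambsDelivered (total_lambs : Int) : Int :=
  if total_lambs = 0 then 0
  else
    (if total_lambs = 1 then 1
     else stingyLoopA total_lambs 1 1 2 2 (by omega) (by omega)) -
    genLoopA total_lambs 1 1 1 (by omega)

-- ===== PORT B =====

-- Python's int.bit_length for a nonnegative argument.
def bitLengthB (n : Nat) : Nat := if n = 0 then 0 else Nat.log2 n + 1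

-- B's single stingy loop: count how many Fibonacci partial sums s stay ≤ t.
def stingyLoopB (t a b s c : Int) (ha : 1 ≤ a) (hb : 1 ≤ b) : Int :=
  if s ≤ t then
    stingyLoopB t b (a + b) (s + b) (c + 1) hb (by omega)
  else c
termination_by (t + 1 - s).toNat
decreasing_by omega

def lambsDelivered_alt (total_lambs : Int) : Int :=
  if total_lambs ≤ 0 then 0
  else
    stingyLoopB total_lambs 1 1 1 0 (by omega) (by omega) -
    ((bitLengthB (total_lambs + 1).toNat : Int) - 1)

-- ===== PRECONDITION & SPEC =====
-- On negative total_lambs A returns 1 (its loops never run, leaving the pre-initialised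
-- counts stingy=2, generous=1), while B returns 0, the intended value since no henchman
-- can be paid with a negative number of lambs.
def D_lambsDelivered (total_lambs : Int) : Prop := total_lambs < 0
instance (total_lambs : Int) : Decidable (D_lambsDelivered total_lambs) := by unfold D_lambsDelivered; infer_instance

def Spec_lambsDelivered (total_lambs : Int) (out : Int) : Prop := ¬ D_lambsDelivered total_lambs → out = lambsDelivered_alt total_lambs
instance (total_lambs : Int) (out : Int) : Decidable (Spec_lambsDelivered total_lambs out) := by unfold Spec_lambsDelivered; infer_instance

def pvDiffWitness_lambsDelivered : Int := (-1)
def pvDiffWitnessOut_lambsDelivered : Int × Int := (1, 0)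

-- ===== CLAIM (what is proved, stated in full; the proofs are below) =====
def Claim_unchanged_lambsDelivered : Prop := ∀ (total_lambs : Int), Dom_lambsDelivered total_lambs → Spec_lambsDelivered total_lambs (lambsDelivered total_lambs)
def Claim_changed_lambsDelivered : Prop := Dom_lambsDelivered (pvDiffWitness_lambsDelivered) ∧ D_lambsDelivered (pvDiffWitness_lambsDelivered) ∧ lambsDelivered (pvDiffWitness_lambsDelivered) = pvDiffWitnessOut_lambsDelivered.1 ∧ lambsDelivered_alt (pvDiffWitness_lambsDelivered) = pvDiffWitnessOut_lambsDelivered.2 ∧ pvDiffWitnessOut_lambsDelivered.1 ≠ pvDiffWitnessOut_lambsDelivered.2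
def Claim_exact_lambsDelivered : Prop := ∀ (total_lambs : Int), Dom_lambsDelivered total_lambs → D_lambsDelivered total_lambs → lambsDelivered total_lambs ≠ lambsDelivered_alt total_lambs

-- ===== LEMMAS AND PROOFS =====

-- A's stingy loop at state (f0, f1, sum, paid) equals B's loop at the state one
-- Fibonacci step ahead: (a, b, s) = (f0+f1, f1+(f0+f1), sum+(f0+f1)), same count.
theorem stingy_corr (t : Int) : ∀ (n : Nat) (f0 f1 sum paid a b s : Int)
    (h0 : 1 ≤ f0) (h1 : 1 ≤ f1) (ha : 1 ≤ a) (hb : 1 ≤ b),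
    a = f0 + f1 → b = f1 + (f0 + f1) → s = sum + (f0 + f1) → (t - sum).toNat ≤ n →
    stingyLoopA t f0 f1 sum paid h0 h1 = stingyLoopB t a b s paid ha hb := by
  intro n
  induction n with
  | zero =>
    intro f0 f1 sum paid a b s h0 h1 ha hb ea eb es hn
    subst ea; subst eb; subst es
    rw [stingyLoopA, if_neg (by omega), stingyLoopB, if_neg (by omega)]
  | succ n ih =>
    intro f0 f1 sum paid a b s h0 h1 ha hb ea eb es hn
    subst ea; subst eb; subst es
    rw [stingyLoopA, stingyLoopB]
    by_cases hlt : sum < t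
    · rw [if_pos hlt]
      by_cases hle : sum + (f0 + f1) ≤ t
      · rw [if_pos hle, if_pos hle]
        exact ih f1 (f0 + f1) (sum + (f0 + f1)) (paid + 1) _ _ _ h1 (by omega)
          (by omega) (by omega) rfl rfl rfl (by omega)
      · rw [if_neg hle, if_neg hle, stingyLoopA, if_neg (by omega)]
    · rw [if_neg hlt, if_neg (by omega)]

-- bit_length of m with 2^(k+1) ≤ m < 2^(k+2) is k+2.
theorem bitLengthB_eq (k m : Nat) (h1 : 2 ^ (k + 1) ≤ m) (h2 : m < 2 ^ (k + 2)) :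
    bitLengthB m = k + 2 := by
  have hpow : 1 ≤ 2 ^ (k + 1) := Nat.one_le_two_pow
  have hm : m ≠ 0 := by omega
  rw [bitLengthB, if_neg hm, Nat.log2_eq_log_two,
    Nat.log_eq_of_pow_le_of_lt_pow h1 h2]

-- A's generous loop at d = 2^k, sum = 2d - 1 ≤ t, paid = k+1 returns bit_length(t+1) - 1.
theorem gen_corr (t : Int) (ht : 1 ≤ t) : ∀ (n k : Nat) (d sum paid : Int) (hd : 1 ≤ d),
    d = 2 ^ k → sum = 2 * d - 1 → paid = (k : Int) + 1 → sum ≤ t → (t - sum).toNat ≤ n →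
    genLoopA t d sum paid hd = (bitLengthB (t + 1).toNat : Int) - 1 := by
  intro n
  induction n with
  | zero =>
    intro k d sum paid hd ed es ep hle hn
    have hsum : sum = t := by omega
    have hc1 : ((2 ^ (k + 1) : Nat) : Int) = 2 * d := by push_cast; rw [ed]; ring
    have hc2 : ((2 ^ (k + 2) : Nat) : Int) = 4 * d := by push_cast; rw [ed]; ring
    have h1 : 2 ^ (k + 1) ≤ (t + 1).toNat := by omega
    have h2 : (t + 1).toNat < 2 ^ (k + 2) := by omega
    rw [genLoopA, if_neg (by omega), bitLengthB_eq k _ h1 h2]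
    push_cast; omega
  | succ n ih =>
    intro k d sum paid hd ed es ep hle hn
    rw [genLoopA]
    by_cases hlt : sum < t
    · rw [if_pos hlt]
      by_cases hle2 : sum + d * 2 ≤ t
      · rw [if_pos hle2]
        exact ih (k + 1) (d * 2) (sum + d * 2) (paid + 1) (by omega)
          (by rw [ed]; ring) (by omega) (by rw [ep]; push_cast; ring) hle2 (by omega)
      · rw [if_neg hle2, genLoopA, if_neg (by omega)]
        have hc1 : ((2 ^ (k + 1) : Nat) : Int) = 2 * d := by push_cast; rw [ed]; ring
        have hc2 : ((2 ^ (k + 2) : Nat) : Int) = 4 * d := by push_cast; rw [ed]; ring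
        have h1 : 2 ^ (k + 1) ≤ (t + 1).toNat := by omega
        have h2 : (t + 1).toNat < 2 ^ (k + 2) := by omega
        rw [bitLengthB_eq k _ h1 h2]; push_cast; omega
    · -- sum ≤ t and ¬ sum < t: sum = t, same as the base case
      rw [if_neg hlt]
      have hsum : sum = t := by omega
      have hc1 : ((2 ^ (k + 1) : Nat) : Int) = 2 * d := by push_cast; rw [ed]; ring
      have hc2 : ((2 ^ (k + 2) : Nat) : Int) = 4 * d := by push_cast; rw [ed]; ring
      have h1 : 2 ^ (k + 1) ≤ (t + 1).toNat := by omega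
      have h2 : (t + 1).toNat < 2 ^ (k + 2) := by omega
      rw [bitLengthB_eq k _ h1 h2]; push_cast; omega

-- ===== VERDICT (by name: the statement is the Claim_ definition above) =====
theorem lambsDelivered_spec : Claim_unchanged_lambsDelivered := by
  intro t _ hnd
  have hge : 0 ≤ t := by
    unfold D_lambsDelivered at hnd; omega
  show lambsDelivered t = lambsDelivered_alt t
  rcases eq_or_lt_of_le hge with h0 | hpos
  · -- t = 0
    rw [lambsDelivered, lambsDelivered_alt, if_pos h0.symm, if_pos (by omega)]
  rcases eq_or_lt_of_le (by omega : (1 : Int) ≤ t) with h1 | h2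
  · -- t = 1
    subst h1
    rw [lambsDelivered, if_neg (by omega), if_pos rfl, genLoopA, if_neg (by omega),
      lambsDelivered_alt, if_neg (by omega), stingyLoopB, if_pos (by omega),
      stingyLoopB, if_neg (by omega)]
    have : bitLengthB ((1 : Int) + 1).toNat = 2 := by decide
    rw [this]; norm_num
  · -- t ≥ 2
    rw [lambsDelivered, if_neg (by omega), if_neg (by omega),
      lambsDelivered_alt, if_neg (by omega),
      stingyLoopB, if_pos (by omega : (1:Int) ≤ t),
      stingyLoopB, if_pos (by omega : (1:Int) + 1 ≤ t)]
    rw [gen_corr t (by omega) (t - 1).toNat 0 1 1 1 (by omega) (by norm_num)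
      (by norm_num) (by norm_num) (by omega) (by omega)]
    rw [stingy_corr t (t - 2).toNat 1 1 2 2 (1 + 1) (1 + (1 + 1)) ((1 + 1) + (1 + 1))
      (by omega) (by omega) (by omega) (by omega) (by norm_num) (by norm_num)
      (by norm_num) (by omega)]
    norm_num

theorem lambsDelivered_changed : Claim_changed_lambsDelivered := by
  unfold Claim_changed_lambsDelivered pvDiffWitness_lambsDelivered pvDiffWitnessOut_lambsDelivered
  refine ⟨by decide, by decide, ?_, ?_, by decide⟩
  · rw [lambsDelivered, if_neg (by omega), if_neg (by omega), stingyLoopA,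
      if_neg (by omega), genLoopA, if_neg (by omega)]
    norm_num
  · rw [lambsDelivered_alt, if_pos (by omega)]

theorem lambsDelivered_tight : Claim_exact_lambsDelivered := by
  intro t _ hD
  unfold D_lambsDelivered at hD
  rw [lambsDelivered, if_neg (by omega), if_neg (by omega), stingyLoopA,
    if_neg (by omega), genLoopA, if_neg (by omega),
    lambsDelivered_alt, if_pos (by omega)]
  norm_num
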